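-- pv_equiv track=rewrite | github.com/siddharth-iyer1/cv-final-visual-impairment-assistance | depth estimator/ultra_yolo.py | matchObjects
-- ===== SOURCE A (Python) =====
-- def matchObjects(box1, box2):
--     matches = []
--     for item1 in box1:
--         obj_class_1 = item1[0]
--         for item2 in box2:
--             obj_class_2 = item2[0]
--             if(obj_class_1 == obj_class_2):
--                 match = (item1, item2)
--                 matches.append(match)
--             else:
--                 continue
--     return matches
-- ===== SOURCE B (Python) =====
-- def matchObjects(box1, box2):
--     matches = []
--     if box1:  # nothing to match (and nothing to group) if box1 is empty
--         groups = {}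
--         for item2 in box2:
--             groups.setdefault(item2[0], []).append(item2)
--         for item1 in box1:
--             for item2 in groups.get(item1[0], []):
--                 matches.append((item1, item2))
--     return matches
-- ===== Notes on version B (the rewrite author's own statement) =====
-- stated objective: alternative
-- what changed: B builds a dict grouping box2 by class once and emits matches per box1 item (skipping all work when box1 is empty), replacing A's nested rescan of box2 for every box1 item (same cost when the output itself is quadratic).
import Mathlib
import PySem

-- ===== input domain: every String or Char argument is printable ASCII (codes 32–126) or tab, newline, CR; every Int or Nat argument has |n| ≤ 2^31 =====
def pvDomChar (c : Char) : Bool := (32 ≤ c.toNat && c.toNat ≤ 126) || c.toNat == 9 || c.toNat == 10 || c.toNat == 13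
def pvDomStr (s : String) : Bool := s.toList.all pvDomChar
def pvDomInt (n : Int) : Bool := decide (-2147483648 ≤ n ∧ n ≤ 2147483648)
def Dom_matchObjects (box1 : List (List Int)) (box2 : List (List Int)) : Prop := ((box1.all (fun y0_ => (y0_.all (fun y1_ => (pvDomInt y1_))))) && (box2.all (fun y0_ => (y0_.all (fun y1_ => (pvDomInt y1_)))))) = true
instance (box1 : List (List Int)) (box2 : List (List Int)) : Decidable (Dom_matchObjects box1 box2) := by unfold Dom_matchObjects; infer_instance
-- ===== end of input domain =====

-- B groups box2 by class into a dict once (skipping all work when box1 is empty) and emits matches per box1 item instead of rescanning box2 for every box1 item; equal results proved on Pre_.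


-- shared helper: item[0] (Python indexing; under Pre_ every row actually indexed is nonempty, so the default is never used)
def pvKey (item : List Int) : Int := PySem.List.pyGetD item 0 0

-- ===== PORT A =====
def matchObjects (box1 : List (List Int)) (box2 : List (List Int)) : List (List Int × List Int) :=
  box1.foldl (fun ms item1 =>
    box2.foldl (fun ms item2 =>
      if pvKey item1 == pvKey item2 then ms ++ [(item1, item2)] else ms)
      ms)
    []

-- ===== PORT B =====
def matchObjects_alt (box1 : List (List Int)) (box2 : List (List Int)) : List (List Int × List Int) :=
  if box1 = [] then []
  else
    let groups : PySem.Dict Int (List (List Int)) :=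
      box2.foldl (fun d item2 => d.modify (pvKey item2) [] (fun l => l ++ [item2])) PySem.Dict.empty
    box1.foldl (fun acc item1 =>
      acc ++ (groups.getD (pvKey item1) []).map (fun item2 => (item1, item2))) []

-- ===== PRECONDITION & SPEC =====
-- Pre_ is exactly the set of inputs on which Python A returns (no IndexError): either box1 is
-- empty (A's loops never index anything and it returns []), or every row of both lists is
-- nonempty (A indexes item[0] on each row of box1 and box2 it visits).
def Pre_matchObjects (box1 : List (List Int)) (box2 : List (List Int)) : Prop :=
  box1 = [] ∨ ((∀ l ∈ box1, l ≠ []) ∧ (∀ l ∈ box2, l ≠ []))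
instance (box1 : List (List Int)) (box2 : List (List Int)) : Decidable (Pre_matchObjects box1 box2) := by unfold Pre_matchObjects; infer_instance
def pvWitness_matchObjects : List (List Int) × List (List Int) := ([[1, 2], [2, 3]], [[1, 5], [3, 6], [1, 7]])
def Spec_matchObjects (box1 : List (List Int)) (box2 : List (List Int)) (out : List (List Int × List Int)) : Prop := out = matchObjects_alt box1 box2
instance (box1 : List (List Int)) (box2 : List (List Int)) (out : List (List Int × List Int)) : Decidable (Spec_matchObjects box1 box2 out) := by unfold Spec_matchObjects; infer_instance

-- ===== CLAIM (what is proved, stated in full; the proofs are below) =====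
def Claim_equal_matchObjects : Prop := ∀ (box1 : List (List Int)) (box2 : List (List Int)), Dom_matchObjects box1 box2 → Pre_matchObjects box1 box2 → Spec_matchObjects box1 box2 (matchObjects box1 box2)

-- ===== LEMMAS AND PROOFS =====

-- B's grouping dict characterised: the bucket for class c is exactly the box2 rows of class c, in order.
theorem pv_groups_getD (box2 : List (List Int)) (d : PySem.Dict Int (List (List Int))) (c : Int) :
    (box2.foldl (fun d item2 => d.modify (pvKey item2) [] (fun l => l ++ [item2])) d).getD c []
      = d.getD c [] ++ box2.filter (fun it => pvKey it == c) := by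
  induction box2 generalizing d with
  | nil => simp
  | cons it rest ih =>
    simp only [List.foldl_cons, List.filter_cons, ih]
    rw [PySem.Dict.getD_modify]
    by_cases h : c = pvKey it
    · simp [h, List.append_assoc]
    · have h' : (pvKey it == c) = false := by simp; omega
      simp [h, h']

-- A's inner scan of box2 equals appending the matching rows of box2 for item1's class.
theorem pv_inner (box2 : List (List Int)) (item1 : List Int) (acc : List (List Int × List Int)) :
    box2.foldl (fun ms item2 =>
        if pvKey item1 == pvKey item2 then ms ++ [(item1, item2)] else ms) acc
      = acc ++ (box2.filter (fun it => pvKey it == pvKey item1)).map (fun item2 => (item1, item2)) := by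
  induction box2 generalizing acc with
  | nil => simp
  | cons it rest ih =>
    simp only [List.foldl_cons, List.filter_cons, ih]
    by_cases h : pvKey item1 = pvKey it
    · simp [h]
    · have h1 : (pvKey item1 == pvKey it) = false := by simp [h]
      have h2 : (pvKey it == pvKey item1) = false := by simp; omega
      simp [h1, h2]

-- ===== VERDICT (by name: the statement is the Claim_ definition above) =====
theorem matchObjects_spec : Claim_equal_matchObjects := by
  intro box1 box2 _ _
  unfold Spec_matchObjects matchObjects matchObjects_alt
  by_cases hb : box1 = []
  · simp [hb]
  · simp only [hb, ite_false]
    simp only [pv_groups_getD, PySem.Dict.getD_empty, List.nil_append, pv_inner]
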